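-- pv_equiv track=rewrite | github.com/fbossuet/semrush-scraper-3 | sem-scraper-final/import_sem.py | clean_domain
-- ===== SOURCE A (Python) =====
-- def clean_domain(domain):
--     """Nettoyer un domaine (enlever l'extension)"""
--     domain_clean = domain.lower().strip()
--     extensions = ['.com', '.fr', '.net', '.org', '.co.uk', '.de', '.es', '.it']
--
--     for ext in extensions:
--         if domain_clean.endswith(ext):
--             domain_clean = domain_clean[:-len(ext)]
--             break
--
--     return domain_clean
-- ===== SOURCE B (Python) =====
-- _TLDS = frozenset(('com', 'fr', 'net', 'org', 'de', 'es', 'it'))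
--
-- def clean_domain(domain):
--     """Nettoyer un domaine (enlever l'extension)"""
--     s = domain.lower().strip()
--     if s.endswith('.co.uk'):
--         return s[:-6]
--     i = s.rfind('.')
--     if i != -1 and s[i + 1:] in _TLDS:
--         return s[:i]
--     return s
-- ===== Notes on version B (the rewrite author's own statement) =====
-- stated objective: idiomatic
-- what changed: Replaced the loop of endswith checks over the extension list by a special case for the one two-label extension plus a last-dot split via rfind and a set lookup of the final label.
import Mathlib
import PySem

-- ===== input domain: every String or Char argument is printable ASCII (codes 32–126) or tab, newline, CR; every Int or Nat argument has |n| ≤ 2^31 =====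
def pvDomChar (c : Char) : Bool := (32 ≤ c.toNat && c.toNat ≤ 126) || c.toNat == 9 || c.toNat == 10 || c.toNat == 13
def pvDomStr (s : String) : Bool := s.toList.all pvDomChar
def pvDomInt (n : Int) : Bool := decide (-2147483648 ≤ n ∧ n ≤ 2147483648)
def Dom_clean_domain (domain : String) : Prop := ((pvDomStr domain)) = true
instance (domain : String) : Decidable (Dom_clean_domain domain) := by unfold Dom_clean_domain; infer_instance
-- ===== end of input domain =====

-- B replaces A's loop of endswith checks by a last-dot split (rfind) plus a set lookup of the final label (objective: idiomatic; same cost).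

-- ===== PORT A =====
-- A's for-loop with break: the first matching extension is stripped
def cleanLoop (dc : String) : List String → String
  | [] => dc
  | ext :: rest =>
    if PySem.Str.endswith dc ext then
      PySem.Str.slice dc none (some (-(PySem.Str.len ext : Int)))
    else cleanLoop dc rest

def clean_domain (domain : String) : String :=
  cleanLoop (PySem.Str.strip (PySem.Str.lower domain))
    [".com", ".fr", ".net", ".org", ".co.uk", ".de", ".es", ".it"]

-- ===== PORT B =====
def tlds : PySem.Set String := PySem.Set.ofList ["com", "fr", "net", "org", "de", "es", "it"]

def clean_domain_alt (domain : String) : String :=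
  let s := PySem.Str.strip (PySem.Str.lower domain)
  if PySem.Str.endswith s ".co.uk" = true then
    PySem.Str.slice s none (some (-6))
  else
    let i := PySem.Str.rfind s "."
    if i ≠ -1 ∧ PySem.Set.contains tlds (PySem.Str.slice s (some (i + 1)) none) = true then
      PySem.Str.slice s none (some i)
    else s

-- ===== PRECONDITION & SPEC =====
def Spec_clean_domain (domain : String) (out : String) : Prop := out = clean_domain_alt domain
instance (domain : String) (out : String) : Decidable (Spec_clean_domain domain out) := by unfold Spec_clean_domain; infer_instance

-- ===== CLAIM (what is proved, stated in full; the proofs are below) =====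
def Claim_equal_clean_domain : Prop := ∀ (domain : String), Dom_clean_domain domain → Spec_clean_domain domain (clean_domain domain)

-- ===== LEMMAS AND PROOFS =====

-- B's body on the cleaned string, as a standalone function of s (proof abbreviation only)
def altBody (s : String) : String :=
  if PySem.Str.endswith s ".co.uk" = true then
    PySem.Str.slice s none (some (-6))
  else
    if PySem.Str.rfind s "." ≠ -1 ∧
        PySem.Set.contains tlds (PySem.Str.slice s (some (PySem.Str.rfind s "." + 1)) none) = true then
      PySem.Str.slice s none (some (PySem.Str.rfind s "."))
    else s

theorem alt_eq_altBody (domain : String) :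
    clean_domain_alt domain = altBody (PySem.Str.strip (PySem.Str.lower domain)) := rfl

-- rfind.go returns the largest index ≤ j where sub occurs
theorem rfindGo_eq (s sub : List Char) (j i : Nat) (hij : i ≤ j)
    (hp : sub.isPrefixOf (s.drop i) = true)
    (hmax : ∀ k, i < k → k ≤ j → sub.isPrefixOf (s.drop k) = false) :
    PySem.Chars.rfind.go s sub j = (i : Int) := by
  induction j with
  | zero =>
    have hi0 : i = 0 := by omega
    subst hi0
    simp only [List.drop_zero] at hp
    simp [PySem.Chars.rfind.go, hp]
  | succ j ih =>
    by_cases h : sub.isPrefixOf (s.drop (j + 1)) = true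
    · have hi : i = j + 1 := by
        by_contra hne
        have hk := hmax (j + 1) (by omega) (le_refl _)
        rw [hk] at h
        exact absurd h (by simp)
      subst hi
      simp [PySem.Chars.rfind.go, h]
    · have hij' : i ≤ j := by
        rcases Nat.lt_or_ge i (j + 1) with h1 | h1
        · omega
        · exfalso; have : i = j + 1 := by omega
          subst this; exact h hp
      have hgo : PySem.Chars.rfind.go s sub (j + 1) = PySem.Chars.rfind.go s sub j := by
        simp [PySem.Chars.rfind.go, h]
      rw [hgo]
      exact ih hij' (fun k hk1 hk2 => hmax k hk1 (by omega))

-- when rfind.go does not return -1, sub occurs at the returned (nonnegative) index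
theorem rfindGo_prefix (s sub : List Char) (j : Nat)
    (h : PySem.Chars.rfind.go s sub j ≠ -1) :
    0 ≤ PySem.Chars.rfind.go s sub j ∧
      sub.isPrefixOf (s.drop (PySem.Chars.rfind.go s sub j).toNat) = true := by
  induction j with
  | zero =>
    by_cases hp : sub.isPrefixOf s = true
    · simpa [PySem.Chars.rfind.go, hp] using hp
    · exfalso; apply h
      simp [PySem.Chars.rfind.go, hp]
  | succ j ih =>
    by_cases hp : sub.isPrefixOf (s.drop (j + 1)) = true
    · have hg : PySem.Chars.rfind.go s sub (j + 1) = (((j + 1 : Nat)) : Int) := by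
        simp [PySem.Chars.rfind.go, hp]
      rw [hg]
      refine ⟨by omega, ?_⟩
      simpa using hp
    · have hgo : PySem.Chars.rfind.go s sub (j + 1) = PySem.Chars.rfind.go s sub j := by
        simp [PySem.Chars.rfind.go, hp]
      rw [hgo] at h ⊢
      exact ih h

-- the last '.' of pre ++ '.' :: rest (rest dot-free) sits at index pre.length
theorem rfind_last_dot (pre rest : List Char) (hnd : ('.' : Char) ∉ rest) :
    PySem.Chars.rfind (pre ++ '.' :: rest) ['.'] = (pre.length : Int) := by
  unfold PySem.Chars.rfind
  apply rfindGo_eq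
  · simp only [List.length_append, List.length_cons]; omega
  · rw [List.drop_left]
    simp
  · intro k hk1 hk2
    have hdrop : (pre ++ '.' :: rest).drop k = rest.drop (k - pre.length - 1) := by
      have h1 : (pre ++ '.' :: rest).drop k
          = ((pre ++ ['.']) ++ rest).drop ((pre ++ ['.']).length + (k - pre.length - 1)) := by
        have ha : pre ++ '.' :: rest = (pre ++ ['.']) ++ rest := by simp
        rw [ha]
        congr 1
        simp only [List.length_append, List.length_cons, List.length_nil]
        omega
      rw [h1, List.drop_length_add_append]
    rw [hdrop]
    by_contra hcon
    simp only [Bool.not_eq_false, List.isPrefixOf_iff_prefix] at hcon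
    rcases hcon with ⟨tl, htl⟩
    exact hnd (List.mem_of_mem_drop (by rw [← htl]; simp))

-- two suffixes of one list compare; derive False when neither is a suffix of the other
theorem suffix_excl {t a b : List Char} (ha : a <:+ t) (hb : b <:+ t)
    (h1 : ¬ a <:+ b) (h2 : ¬ b <:+ a) : False := by
  rcases List.suffix_or_suffix_of_suffix ha hb with h | h
  · exact h1 h
  · exact h2 h

-- endswith on the cleaned string, as a list suffix
theorem ends_suffix {s p : String} (h : PySem.Str.endswith s p = true) :
    p.toList <:+ s.toList := by
  rw [PySem.Str.endswith_eq] at h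
  exact (PySem.Chars.endswith_iff _ _).mp h

-- a matched extension yields the decomposition s.toList = pre ++ ext.toList
theorem ends_decomp {s p : String} (h : PySem.Str.endswith s p = true) :
    ∃ pre, s.toList = pre ++ p.toList := by
  rcases ends_suffix h with ⟨pre, hpre⟩
  exact ⟨pre, hpre.symm⟩

-- ¬ endswith .co.uk for a string ending in a suffix incompatible with it
theorem not_couk {s p : String} (hp : PySem.Str.endswith s p = true)
    (h1 : ¬ p.toList <:+ (".co.uk" : String).toList)
    (h2 : ¬ (".co.uk" : String).toList <:+ p.toList) :
    ¬ PySem.Str.endswith s ".co.uk" = true := by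
  intro hc
  exact suffix_excl (ends_suffix hp) (ends_suffix hc) h1 h2

-- the shared positive case: s ends with ext = '.'::lbl (lbl a dot-free tlds label) and
-- not with .co.uk: B takes its rfind branch and strips the same characters A strips
theorem case_label (s ext : String) (pre lbl : List Char)
    (hnd : ('.' : Char) ∉ lbl)
    (hmem : PySem.Set.contains tlds (String.ofList lbl) = true)
    (hlen : PySem.Str.len ext = ((lbl.length + 1 : Nat) : Int))
    (ht : s.toList = pre ++ '.' :: lbl)
    (hcouk : ¬ PySem.Str.endswith s ".co.uk" = true) :
    altBody s = PySem.Str.slice s none (some (-(PySem.Str.len ext : Int))) := by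
  have hr : PySem.Str.rfind s "." = (pre.length : Int) := by
    have hb : PySem.Str.rfind s "." = PySem.Chars.rfind s.toList ['.'] := by simp
    rw [hb, ht, rfind_last_dot pre lbl hnd]
  have htail : PySem.Str.slice s (some ((pre.length : Int) + 1)) none = String.ofList lbl := by
    apply String.toList_inj.mp
    have h1 : (PySem.Str.slice s (some ((pre.length : Int) + 1)) none).toList
        = s.toList.drop (pre.length + 1) := by
      simp only [PySem.Str.toList_slice, PySem.Chars.slice_eq_listSlice]
      rw [PySem.List.slice_from s.toList (by omega : (0 : Int) ≤ (pre.length : Int) + 1)]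
      congr 1 <;> omega
    rw [h1, ht]
    have h2 : pre ++ '.' :: lbl = (pre ++ ['.']) ++ lbl := by simp
    have h3 : pre.length + 1 = (pre ++ ['.']).length := by simp
    rw [h2, h3, List.drop_left]
    simp
  unfold altBody
  rw [if_neg hcouk, hr, htail, if_pos ⟨by omega, hmem⟩]
  apply String.toList_inj.mp
  have hA : (PySem.Str.slice s none (some (-(PySem.Str.len ext : Int)))).toList
      = s.toList.take (s.toList.length - (lbl.length + 1)) := by
    simp only [PySem.Str.toList_slice, PySem.Chars.slice_eq_listSlice, hlen]
    exact PySem.List.slice_to_neg_natCast s.toList (lbl.length + 1) (by omega)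
  have hB : (PySem.Str.slice s none (some ((pre.length : Int)))).toList
      = s.toList.take pre.length := by
    simp only [PySem.Str.toList_slice, PySem.Chars.slice_eq_listSlice]
    exact PySem.List.slice_to_natCast s.toList pre.length
  rw [hA, hB]
  have hlength : s.toList.length - (lbl.length + 1) = pre.length := by
    rw [ht]; simp
  rw [hlength]

-- the final negative case: no extension matches, B returns s unchanged
theorem case_none (s : String)
    (h1 : ¬ PySem.Str.endswith s ".com" = true)
    (h2 : ¬ PySem.Str.endswith s ".fr" = true)
    (h3 : ¬ PySem.Str.endswith s ".net" = true)
    (h4 : ¬ PySem.Str.endswith s ".org" = true)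
    (h5 : ¬ PySem.Str.endswith s ".co.uk" = true)
    (h6 : ¬ PySem.Str.endswith s ".de" = true)
    (h7 : ¬ PySem.Str.endswith s ".es" = true)
    (h8 : ¬ PySem.Str.endswith s ".it" = true) :
    altBody s = s := by
  unfold altBody
  rw [if_neg h5]
  by_cases hr : PySem.Str.rfind s "." = -1
  · rw [if_neg]; rintro ⟨hne, -⟩; exact hne hr
  · have hrr : PySem.Str.rfind s "." = PySem.Chars.rfind.go s.toList ['.'] s.toList.length := by
      simp [PySem.Chars.rfind]
    have hgo : PySem.Chars.rfind.go s.toList ['.'] s.toList.length ≠ -1 := by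
      rw [← hrr]; exact hr
    obtain ⟨hpos, hpref⟩ := rfindGo_prefix s.toList ['.'] s.toList.length hgo
    rw [← hrr] at hpos hpref
    set r := PySem.Str.rfind s "." with hrdef
    -- the character at index r.toNat is '.', so s.toList.drop r.toNat = '.' :: tail
    have hsplit : s.toList.drop r.toNat = '.' :: s.toList.drop (r.toNat + 1) := by
      rw [List.isPrefixOf_iff_prefix] at hpref
      rcases hpref with ⟨tl, htl⟩
      have htail : tl = s.toList.drop (r.toNat + 1) := by
        have hct := congrArg List.tail htl
        simpa [List.tail_drop] using hct
      rw [← htl, htail]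
      rfl
    have hsuf : '.' :: s.toList.drop (r.toNat + 1) <:+ s.toList := by
      rw [← hsplit]; exact List.drop_suffix _ _
    -- B's tail slice in list form
    have htailL : (PySem.Str.slice s (some (r + 1)) none).toList = s.toList.drop (r.toNat + 1) := by
      simp only [PySem.Str.toList_slice, PySem.Chars.slice_eq_listSlice]
      rw [PySem.List.slice_from s.toList (by omega : (0 : Int) ≤ r + 1)]
      congr 1 <;> omega
    rw [if_neg]
    rintro ⟨-, hcont⟩
    -- membership in the tlds set forces one of the seven labels
    have hset : tlds = (["com", "fr", "net", "org", "de", "es", "it"] : List String) := by decide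
    have hmem : (PySem.Str.slice s (some (r + 1)) none) ∈
        (["com", "fr", "net", "org", "de", "es", "it"] : List String) := by
      rw [hset] at hcont
      simpa [PySem.Set.contains] using hcont
    have hend : ∀ (p : String), (PySem.Str.slice s (some (r + 1)) none) = p →
        PySem.Str.endswith s ("." ++ p) = true := by
      intro p hp
      rw [PySem.Str.endswith_eq]
      apply (PySem.Chars.endswith_iff _ _).mpr
      have hpl : ("." ++ p : String).toList = '.' :: p.toList := by simp
      have hpt : p.toList = s.toList.drop (r.toNat + 1) := by rw [← hp, htailL]
      rw [hpl, hpt]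
      exact hsuf
    simp only [List.mem_cons, List.not_mem_nil, or_false] at hmem
    rcases hmem with hm | hm | hm | hm | hm | hm | hm
    · exact h1 (hend _ hm)
    · exact h2 (hend _ hm)
    · exact h3 (hend _ hm)
    · exact h4 (hend _ hm)
    · exact h6 (hend _ hm)
    · exact h7 (hend _ hm)
    · exact h8 (hend _ hm)

-- the loop/alt agreement on an arbitrary cleaned string
theorem key (s : String) :
    cleanLoop s [".com", ".fr", ".net", ".org", ".co.uk", ".de", ".es", ".it"] = altBody s := by
  by_cases h1 : PySem.Str.endswith s ".com" = true
  · obtain ⟨pre, hpre⟩ := ends_decomp h1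
    have hc := case_label s ".com" pre ['c','o','m'] (by decide) (by decide)
      (by decide) (by rw [hpre]; rfl) (not_couk h1 (by decide) (by decide))
    simp only [cleanLoop, h1, if_pos]
    exact hc.symm
  · by_cases h2 : PySem.Str.endswith s ".fr" = true
    · obtain ⟨pre, hpre⟩ := ends_decomp h2
      have hc := case_label s ".fr" pre ['f','r'] (by decide) (by decide)
        (by decide) (by rw [hpre]; rfl) (not_couk h2 (by decide) (by decide))
      simp only [cleanLoop, h1, h2, if_pos, Bool.false_eq_true, if_false]
      exact hc.symm
    · by_cases h3 : PySem.Str.endswith s ".net" = true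
      · obtain ⟨pre, hpre⟩ := ends_decomp h3
        have hc := case_label s ".net" pre ['n','e','t'] (by decide) (by decide)
          (by decide) (by rw [hpre]; rfl) (not_couk h3 (by decide) (by decide))
        simp only [cleanLoop, h1, h2, h3, if_pos, Bool.false_eq_true, if_false]
        exact hc.symm
      · by_cases h4 : PySem.Str.endswith s ".org" = true
        · obtain ⟨pre, hpre⟩ := ends_decomp h4
          have hc := case_label s ".org" pre ['o','r','g'] (by decide) (by decide)
            (by decide) (by rw [hpre]; rfl) (not_couk h4 (by decide) (by decide))
          simp only [cleanLoop, h1, h2, h3, h4, if_pos, Bool.false_eq_true, if_false]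
          exact hc.symm
        · by_cases h5 : PySem.Str.endswith s ".co.uk" = true
          · simp only [cleanLoop, h1, h2, h3, h4, h5, if_pos, Bool.false_eq_true, if_false]
            unfold altBody
            rw [if_pos h5]
            have hl6 : (".co.uk" : String).length = 6 := by decide
            norm_num [PySem.Str.len, hl6]
          · by_cases h6 : PySem.Str.endswith s ".de" = true
            · obtain ⟨pre, hpre⟩ := ends_decomp h6
              have hc := case_label s ".de" pre ['d','e'] (by decide) (by decide)
                (by decide) (by rw [hpre]; rfl) h5
              simp only [cleanLoop, h1, h2, h3, h4, h5, h6, if_pos, Bool.false_eq_true, if_false]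
              exact hc.symm
            · by_cases h7 : PySem.Str.endswith s ".es" = true
              · obtain ⟨pre, hpre⟩ := ends_decomp h7
                have hc := case_label s ".es" pre ['e','s'] (by decide) (by decide)
                  (by decide) (by rw [hpre]; rfl) h5
                simp only [cleanLoop, h1, h2, h3, h4, h5, h6, h7, if_pos,
                  Bool.false_eq_true, if_false]
                exact hc.symm
              · by_cases h8 : PySem.Str.endswith s ".it" = true
                · obtain ⟨pre, hpre⟩ := ends_decomp h8
                  have hc := case_label s ".it" pre ['i','t'] (by decide) (by decide)
                    (by decide) (by rw [hpre]; rfl) h5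
                  simp only [cleanLoop, h1, h2, h3, h4, h5, h6, h7, h8, if_pos,
                    Bool.false_eq_true, if_false]
                  exact hc.symm
                · simp only [cleanLoop, h1, h2, h3, h4, h5, h6, h7, h8,
                    Bool.false_eq_true, if_false]
                  exact (case_none s h1 h2 h3 h4 h5 h6 h7 h8).symm

-- ===== VERDICT (by name: the statement is the Claim_ definition above) =====
theorem clean_domain_spec : Claim_equal_clean_domain := by
  intro domain _
  unfold Spec_clean_domain
  rw [alt_eq_altBody]
  exact key (PySem.Str.strip (PySem.Str.lower domain))
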